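-- pv_equiv track=rewrite | github.com/sorgfresser/RLMEval | src/rlm_eval/utils.py | generate_n_samples_sequence
-- ===== SOURCE A (Python) =====
-- def generate_n_samples_sequence(max_n: int) -> list[int]:
--     """Generate the sequence 1, 2, 5, 10, 20, 50, 100, 200, 500, 1000, ... until max_n, max_n included."""
--     repeating_seq = [1, 2, 5]
--     sequence = []
--     i = 1
--     while i <= max_n:
--         sequence.extend([i * r for r in repeating_seq if i * r <= max_n])
--         i *= 10
--     if sequence[-1] != max_n:
--         sequence.append(max_n)
--     return sequence
-- ===== SOURCE B (Python) =====
-- def generate_n_samples_sequence(max_n: int) -> list[int]: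
--     """Generate the sequence 1, 2, 5, 10, 20, 50, 100, 200, 500, 1000, ... until max_n, max_n included."""
--     def upto(n: int) -> list[int]:
--         # all values m * 10**e (m in 1,2,5) that are <= n, ascending:
--         # the sub-decade values <= n, then 10 times the solution for n // 10
--         if n < 1:
--             return []
--         return [m for m in (1, 2, 5) if m <= n] + [10 * v for v in upto(n // 10)]
--     sequence = upto(max_n)
--     if sequence[-1] != max_n:
--         sequence.append(max_n)
--     return sequence
-- ===== Notes on version B (the rewrite author's own statement) =====
-- stated objective: alternative
-- what changed: Replaces A's iterative decade loop (i *= 10 with a filtered comprehension per decade, testing each candidate against max_n) by a divide-and-conquer recursion on max_n itself: upto(n) takes the sub-decade values <= n and prepends them to 10 times upto(n // 10), so the bound shrinks by division instead of the candidate growing by multiplication.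
import Mathlib
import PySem

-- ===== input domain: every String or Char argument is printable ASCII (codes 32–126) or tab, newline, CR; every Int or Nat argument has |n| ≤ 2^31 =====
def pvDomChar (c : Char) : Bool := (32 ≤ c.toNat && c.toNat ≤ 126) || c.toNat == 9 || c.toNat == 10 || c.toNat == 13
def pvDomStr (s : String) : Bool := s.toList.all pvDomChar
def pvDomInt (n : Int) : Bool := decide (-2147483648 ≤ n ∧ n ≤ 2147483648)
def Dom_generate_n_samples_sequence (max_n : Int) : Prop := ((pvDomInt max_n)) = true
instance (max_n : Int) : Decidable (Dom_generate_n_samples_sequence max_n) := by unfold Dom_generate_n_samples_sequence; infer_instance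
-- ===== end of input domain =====

-- B replaces A's iterative decade loop by a recursion on max_n // 10 (values <= n are
-- the sub-decade ones plus 10 times the values <= n // 10); same return value on
-- 1 <= max_n (both raise IndexError below that).


-- ===== PORT A =====
-- small termination facts for the decade loop (cited by name; kept above the port for that reason)
theorem pvOneLeMul10 {i : Int} (hi : 1 ≤ i) : 1 ≤ i * 10 :=
  le_trans hi (le_mul_of_one_le_right (le_trans one_pos.le hi) (by decide))

theorem pvLoopA_dec {max_n i : Int} (hi : 1 ≤ i) (h : i ≤ max_n) :
    (max_n + 1 - i * 10).toNat < (max_n + 1 - i).toNat :=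
  (Int.toNat_lt_toNat (Int.sub_pos.mpr (Int.lt_add_one_iff.mpr h))).mpr
    (sub_lt_sub_left (lt_mul_right (lt_of_lt_of_le one_pos hi) (by decide)) (max_n + 1))

-- the 'while i <= max_n' loop of A; i starts at 1 and is multiplied by 10,
-- the invariant 1 ≤ i is carried as a hypothesis for termination
def pvLoopA (max_n i : Int) (acc : List Int) (hi : 1 ≤ i) : List Int :=
  if h : i ≤ max_n then
    -- sequence.extend([i * r for r in repeating_seq if i * r <= max_n])
    pvLoopA max_n (i * 10)
      (acc ++ (([1, 2, 5].filter (fun r => i * r ≤ max_n)).map (fun r => i * r)))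
      (pvOneLeMul10 hi)
  else acc
termination_by (max_n + 1 - i).toNat
decreasing_by exact pvLoopA_dec hi h

def generate_n_samples_sequence (max_n : Int) : List Int :=
  let sequence := pvLoopA max_n 1 [] (le_refl 1)
  match sequence.getLast? with
  | none => sequence            -- Python raises IndexError here (sequence[-1] on []); excluded by Pre_
  | some last => if last ≠ max_n then sequence ++ [max_n] else sequence

-- ===== PORT B =====
-- termination fact for the recursion (cited by name in 'decreasing_by')
theorem pvUpto_dec {n : Int} (h : ¬ n < 1) : (PySem.Int.floordiv n 10).toNat < n.toNat := by
  rw [PySem.Int.floordiv_eq_ediv_of_pos (by decide)]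
  by_cases h10 : n < 10
  · have : n / 10 = 0 := Int.ediv_eq_zero_of_lt (by omega) h10
    omega
  · have hd := Int.mul_ediv_add_emod n 10
    have h2 := Int.emod_nonneg n (show (10:Int) ≠ 0 by decide)
    have h3 := Int.emod_lt_of_pos n (show (0:Int) < 10 by decide)
    omega

-- def upto(n): the recursive helper of B
def pvUpto (n : Int) : List Int :=
  if h : n < 1 then []
  else ([1, 2, 5].filter (fun m => m ≤ n)) ++ (pvUpto (PySem.Int.floordiv n 10)).map (fun v => 10 * v)
termination_by n.toNat
decreasing_by exact pvUpto_dec h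

def generate_n_samples_sequence_alt (max_n : Int) : List Int :=
  let sequence := pvUpto max_n
  match sequence.getLast? with
  | none => sequence            -- Python raises IndexError here; excluded by Pre_
  | some last => if last ≠ max_n then sequence ++ [max_n] else sequence

-- ===== PRECONDITION & SPEC =====
-- Pre_ excludes exactly max_n < 1, where both A and B raise IndexError (sequence[-1] on an empty list)
def Pre_generate_n_samples_sequence (max_n : Int) : Prop := 1 ≤ max_n
instance (max_n : Int) : Decidable (Pre_generate_n_samples_sequence max_n) := by unfold Pre_generate_n_samples_sequence; infer_instance

def pvWitness_generate_n_samples_sequence : Int := 37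

def Spec_generate_n_samples_sequence (max_n : Int) (out : List Int) : Prop := out = generate_n_samples_sequence_alt max_n
instance (max_n : Int) (out : List Int) : Decidable (Spec_generate_n_samples_sequence max_n out) := by unfold Spec_generate_n_samples_sequence; infer_instance

-- ===== CLAIM (what is proved, stated in full; the proofs are below) =====
def Claim_equal_generate_n_samples_sequence : Prop := ∀ (max_n : Int), Dom_generate_n_samples_sequence max_n → Pre_generate_n_samples_sequence max_n → Spec_generate_n_samples_sequence max_n (generate_n_samples_sequence max_n)

-- ===== LEMMAS AND PROOFS =====

-- floor division by a positive i, then by 10, is floor division by i * 10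
theorem pvFloordiv_floordiv (a i : Int) (hi : 0 < i) :
    PySem.Int.floordiv (PySem.Int.floordiv a i) 10 = PySem.Int.floordiv a (i * 10) := by
  rw [PySem.Int.floordiv_eq_ediv_of_pos hi, PySem.Int.floordiv_eq_ediv_of_pos (by decide),
    PySem.Int.floordiv_eq_ediv_of_pos (by positivity)]
  exact Int.ediv_ediv_of_nonneg (le_of_lt hi)

-- loop ↔ recursion correspondence: A's loop from multiplier i equals
-- acc ++ i · (B's recursion at max_n // i)
theorem pvLoopA_eq_upto (max_n : Int) :
    ∀ (i : Int) (hi : 1 ≤ i) (acc : List Int),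
      pvLoopA max_n i acc hi =
        acc ++ (pvUpto (PySem.Int.floordiv max_n i)).map (fun v => i * v) := by
  intro i hi acc
  induction i, acc, hi using pvLoopA.induct max_n with
  | case1 i acc hi h ih =>
    set q := PySem.Int.floordiv max_n i with hq
    have hq1 : 1 ≤ q := by
      rw [hq, PySem.Int.le_floordiv_iff_mul_le (by omega)]; omega
    have hfil : ([1, 2, 5].filter (fun m => m ≤ q)) = ([1, 2, 5].filter (fun r => i * r ≤ max_n)) := by
      have key : ∀ m : Int, (decide (m ≤ q)) = (decide (i * m ≤ max_n)) := by
        intro m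
        have : m ≤ q ↔ i * m ≤ max_n := by
          rw [hq, PySem.Int.le_floordiv_iff_mul_le (by omega), mul_comm]
        simp [this]
      simp only [List.filter, key]
    have hdiv : PySem.Int.floordiv q 10 = PySem.Int.floordiv max_n (i * 10) := by
      rw [hq]; exact pvFloordiv_floordiv max_n i (by omega)
    have hqdef : pvUpto q =
        ([1, 2, 5].filter (fun m => m ≤ q)) ++ (pvUpto (PySem.Int.floordiv q 10)).map (fun v => 10 * v) := by
      conv_lhs => rw [pvUpto]
      rw [dif_neg (by omega)]
    rw [pvLoopA, dif_pos h, ih, List.append_assoc]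
    congr 1
    rw [hqdef, hfil, hdiv, List.map_append, List.map_map]
    congr 1
    apply List.map_congr_left
    intro v _
    simp [Function.comp]; ring
  | case2 i acc hi h =>
    rw [pvLoopA, dif_neg h]
    have hq0 : PySem.Int.floordiv max_n i < 1 := by
      rw [PySem.Int.floordiv_lt_iff_lt_mul (by omega)]; omega
    rw [pvUpto, dif_pos hq0]
    simp

theorem pvLoop_top (max_n : Int) : pvLoopA max_n 1 [] (le_refl 1) = pvUpto max_n := by
  rw [pvLoopA_eq_upto max_n 1 (le_refl 1) [],
    show PySem.Int.floordiv max_n 1 = max_n from by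
      rw [PySem.Int.floordiv_eq_ediv_of_pos (by decide)]; exact Int.ediv_one max_n]
  simp

-- ===== VERDICT (by name: the statement is the Claim_ definition above) =====
theorem generate_n_samples_sequence_spec : Claim_equal_generate_n_samples_sequence := by
  intro max_n _ _
  unfold Spec_generate_n_samples_sequence generate_n_samples_sequence generate_n_samples_sequence_alt
  rw [pvLoop_top]
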